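-- pv_equiv track=rewrite | github.com/marilabs/training-algo | Competitive programming in Python/Intersection of Intervals.py | intersect_max
-- ===== SOURCE A (Python) =====
-- def intersect_max(set):
--     l = ([(left, +1) for left, _ in set]
--          + [(right + 1, -1) for _, right in set]) # +1 to get an interval closed
--                                                 # on the right, it matches the prologin
--                                                 #  challenge and not the book
--     l.sort()
--     counter = 0
--     opti = (counter, None)
--     for (x, y) in l:
--         counter += y
--         if opti[0] < counter:
--             opti = (counter, x)
--     return opti
-- ===== SOURCE B (Python) =====
-- def intersect_max(set):
--     # Two-pointer merge over separately sorted start/end coordinates.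
--     starts = sorted(left for left, _ in set)
--     ends = sorted(right + 1 for _, right in set)  # right+1: closed on the right
--     i = j = 0
--     counter = 0
--     opti = (0, None)
--     while i < len(starts) and j < len(ends):
--         if ends[j] <= starts[i]:          # end first on ties, as -1 sorts before +1
--             counter -= 1
--             j += 1
--         else:
--             counter += 1
--             if opti[0] < counter:
--                 opti = (counter, starts[i])
--             i += 1
--     # leftover ends only decrement the counter and can never improve opti
--     while i < len(starts):
--         counter += 1
--         if opti[0] < counter:
--             opti = (counter, starts[i])
--         i += 1
--     return opti
-- ===== Notes on version B (the rewrite author's own statement) =====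
-- stated objective: alternative
-- what changed: Replaces building and sorting one combined (coordinate, +/-1) event list with two separately sorted coordinate arrays (starts and ends+1) merged by a two-pointer walk that only checks/updates the optimum at start events.
import Mathlib
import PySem

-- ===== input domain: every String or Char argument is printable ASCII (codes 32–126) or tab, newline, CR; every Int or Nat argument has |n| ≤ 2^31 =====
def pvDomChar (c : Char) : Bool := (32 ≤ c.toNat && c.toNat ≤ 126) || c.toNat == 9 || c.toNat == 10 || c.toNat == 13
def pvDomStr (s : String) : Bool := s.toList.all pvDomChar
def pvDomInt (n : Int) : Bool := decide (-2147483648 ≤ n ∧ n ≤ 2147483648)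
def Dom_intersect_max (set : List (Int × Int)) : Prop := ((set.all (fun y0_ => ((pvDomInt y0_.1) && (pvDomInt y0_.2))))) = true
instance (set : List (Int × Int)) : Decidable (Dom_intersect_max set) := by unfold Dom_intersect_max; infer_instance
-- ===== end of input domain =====

-- B replaces A's single sorted (coordinate, ±1) event list by a two-pointer merge of two
-- separately sorted coordinate arrays (alternative decomposition, same cost).

-- ===== PORT A =====
def intersect_max (set : List (Int × Int)) : Int × Option Int :=
  let l : List (Int × Int) :=
    set.map (fun p => (p.1, (1 : Int))) ++ set.map (fun p => (p.2 + 1, (-1 : Int)))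
  let l' := PySem.List.sorted2 l Prod.fst Prod.snd
  (l'.foldl (fun st xy =>
      let counter := st.1 + xy.2
      (counter, if st.2.1 < counter then (counter, some xy.1) else st.2))
    ((0 : Int), ((0 : Int), (none : Option Int)))).2

-- ===== PORT B =====
-- two-pointer walk of Source B: the main while-loop (both arrays nonempty), then the trailing
-- while-loop over the remaining starts; leftover ends are dropped (Source B's comment).
def pvWalk : List Int → List Int → Int → Int × Option Int → Int × Option Int
  | s :: ss, e :: es, counter, opti =>
    if e ≤ s then pvWalk (s :: ss) es (counter - 1) opti
    else
      let c := counter + 1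
      pvWalk ss (e :: es) c (if opti.1 < c then (c, some s) else opti)
  | [], _, _, opti => opti
  | s :: ss, [], counter, opti =>
    let c := counter + 1
    pvWalk ss [] c (if opti.1 < c then (c, some s) else opti)
termination_by ss es _ _ => ss.length + es.length

def intersect_max_alt (set : List (Int × Int)) : Int × Option Int :=
  let starts := PySem.List.sorted (set.map Prod.fst) (fun x => x)
  let ends := PySem.List.sorted (set.map (fun p => p.2 + 1)) (fun x => x)
  pvWalk starts ends 0 (0, none)

-- ===== PRECONDITION & SPEC =====
def Spec_intersect_max (set : List (Int × Int)) (out : Int × Option Int) : Prop := out = intersect_max_alt set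
instance (set : List (Int × Int)) (out : Int × Option Int) : Decidable (Spec_intersect_max set out) := by unfold Spec_intersect_max; infer_instance

-- ===== CLAIM (what is proved, stated in full; the proofs are below) =====
def Claim_equal_intersect_max : Prop := ∀ (set : List (Int × Int)), Dom_intersect_max set → Spec_intersect_max set (intersect_max set)

-- ===== LEMMAS AND PROOFS =====

-- A's loop body, named
def pvStep (st : Int × (Int × Option Int)) (xy : Int × Int) : Int × (Int × Option Int) :=
  let counter := st.1 + xy.2
  (counter, if st.2.1 < counter then (counter, some xy.1) else st.2)

-- the merged event list B's two-pointer walk implicitly traverses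
def pvMerge : List Int → List Int → List (Int × Int)
  | s :: ss, e :: es =>
    if e ≤ s then (e, -1) :: pvMerge (s :: ss) es
    else (s, 1) :: pvMerge ss (e :: es)
  | [], es => es.map (fun e => (e, (-1 : Int)))
  | ss, [] => ss.map (fun s => (s, (1 : Int)))
termination_by ss es => ss.length + es.length

-- lexicographic ≤ on events (Python's tuple order; -1 sorts before +1 at equal coordinates)
def pvR (p q : Int × Int) : Prop := p.1 < q.1 ∨ (p.1 = q.1 ∧ p.2 ≤ q.2)

theorem pvMerge_perm : ∀ ss es : List Int,
    (pvMerge ss es).Perm (ss.map (fun s => (s, (1 : Int))) ++ es.map (fun e => (e, (-1 : Int)))) := by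
  intro ss es
  fun_induction pvMerge ss es with
  | case1 s ss e es h ih =>
    simpa [pvMerge, h] using ((ih.cons (e, -1)).trans List.perm_middle.symm)
  | case2 s ss e es h ih =>
    simpa [pvMerge, h] using ih.cons (s, 1)
  | case3 es => simp
  | case4 ss h => cases ss <;> simp

theorem mem_pvMerge {ss es : List Int} {z : Int × Int} (h : z ∈ pvMerge ss es) :
    (∃ s ∈ ss, z = (s, 1)) ∨ (∃ e ∈ es, z = (e, -1)) := by
  have := (pvMerge_perm ss es).mem_iff.mp h
  simp only [List.mem_append, List.mem_map] at this
  rcases this with ⟨s, hs, rfl⟩ | ⟨e, he, rfl⟩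
  · exact Or.inl ⟨s, hs, rfl⟩
  · exact Or.inr ⟨e, he, rfl⟩

-- merging two sorted coordinate lists, ends first on ties, yields a lex-sorted event list
theorem pvMerge_pairwise : ∀ ss es : List Int, ss.Pairwise (· ≤ ·) → es.Pairwise (· ≤ ·) →
    (pvMerge ss es).Pairwise pvR := by
  intro ss es
  fun_induction pvMerge ss es with
  | case1 s ss e es h ih =>
    intro hss hes
    simp only [pvMerge, if_pos h, List.pairwise_cons]
    refine ⟨?_, ih hss (List.Pairwise.sublist (List.sublist_cons_self e es) hes)⟩
    intro z hz
    rcases mem_pvMerge hz with ⟨s', hs', rfl⟩ | ⟨e', he', rfl⟩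
    · have : s ≤ s' := by
        rcases List.mem_cons.mp hs' with h' | h'
        · omega
        · exact (List.pairwise_cons.mp hss).1 s' h'
      unfold pvR; simp; omega
    · have : e ≤ e' := (List.pairwise_cons.mp hes).1 e' he'
      unfold pvR; simp; omega
  | case2 s ss e es h ih =>
    intro hss hes
    simp only [pvMerge, if_neg h, List.pairwise_cons]
    refine ⟨?_, ih (List.pairwise_cons.mp hss).2 hes⟩
    intro z hz
    rcases mem_pvMerge hz with ⟨s', hs', rfl⟩ | ⟨e', he', rfl⟩
    · have : s ≤ s' := (List.pairwise_cons.mp hss).1 s' hs'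
      unfold pvR; simp; omega
    · have : e ≤ e' := by
        rcases List.mem_cons.mp he' with h' | h'
        · omega
        · exact (List.pairwise_cons.mp hes).1 e' h'
      unfold pvR; simp; omega
  | case3 es =>
    intro _ hes
    exact List.Pairwise.map _ (fun {a b} hab => by unfold pvR; simp; omega) hes
  | case4 ss h =>
    intro hss _
    exact List.Pairwise.map _ (fun {a b} hab => by unfold pvR; simp; omega) hss

-- the boolean tuple comparison sorted2 uses
def pvBefore (a b : Int × Int) : Bool :=
  decide (a.1 < b.1) || (!decide (b.1 < a.1) && decide (a.2 < b.2))

theorem pvInsertBy_pairwise (x : Int × Int) : ∀ acc : List (Int × Int), acc.Pairwise pvR →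
    (PySem.List.insertBy pvBefore x acc).Pairwise pvR := by
  intro acc
  induction acc with
  | nil => intro _; simp [PySem.List.insertBy]
  | cons y ys ih =>
    intro h
    rw [List.pairwise_cons] at h
    by_cases hb : pvBefore x y = true
    · simp only [PySem.List.insertBy, hb, if_true, List.pairwise_cons]
      have hxy : pvR x y := by unfold pvBefore at hb; unfold pvR; simp at hb; omega
      refine ⟨?_, h.1, h.2⟩
      intro z hz
      rcases List.mem_cons.mp hz with rfl | hz'
      · exact hxy
      · rcases hxy with h1 | h1 <;> rcases h.1 z hz' with h2 | h2 <;> unfold pvR <;> unfold pvR at * <;> omega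
    · simp only [PySem.List.insertBy, hb, Bool.false_eq_true, if_false, List.pairwise_cons]
      have hyx : pvR y x := by
        unfold pvBefore at hb; unfold pvR; simp at hb; omega
      refine ⟨?_, ih h.2⟩
      intro z hz
      rcases (PySem.List.mem_insertBy _ _ _ _).mp hz with rfl | hz'
      · exact hyx
      · exact h.1 z hz'

theorem pvSorted2_pairwise (xs : List (Int × Int)) :
    (PySem.List.sorted2 xs Prod.fst Prod.snd).Pairwise pvR := by
  show (List.foldl (fun acc x => PySem.List.insertBy pvBefore x acc) [] xs).Pairwise pvR
  generalize h : ([] : List (Int × Int)) = acc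
  have hacc : acc.Pairwise pvR := by rw [← h]; simp
  clear h
  induction xs generalizing acc with
  | nil => simpa using hacc
  | cons x xs ih => exact ih _ (pvInsertBy_pairwise x acc hacc)

-- sorted2 output is the unique lex-sorted permutation
theorem pvSorted2_eq (xs ys : List (Int × Int)) (hp : ys.Perm xs) (hs : ys.Pairwise pvR) :
    PySem.List.sorted2 xs Prod.fst Prod.snd = ys := by
  have ha : ∀ a b : Int × Int, pvR a b → pvR b a → a = b := by
    intro a b h1 h2
    have : a.1 = b.1 ∧ a.2 = b.2 := by unfold pvR at *; omega
    exact Prod.ext this.1 this.2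
  exact List.Perm.eq_of_pairwise (fun a b _ _ => ha a b)
    (pvSorted2_pairwise xs) hs
    ((PySem.List.sorted2_perm xs Prod.fst Prod.snd false).trans hp.symm)

-- folding only end events never changes opti: the counter only drops below opti.1
theorem pvFold_ends (es : List Int) : ∀ (c : Int) (o : Int × Option Int), c ≤ o.1 →
    ((es.map (fun e => (e, (-1 : Int)))).foldl pvStep (c, o)).2 = o := by
  induction es with
  | nil => intro c o h; simp
  | cons e es ih =>
    intro c o h
    have hno : ¬ o.1 < c + (-1) := by omega
    simp only [List.map_cons, List.foldl_cons, pvStep, hno, if_false]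
    exact ih (c - 1) o (by omega)

theorem pvWalk_starts : ∀ (ss : List Int) (c : Int) (o : Int × Option Int), c ≤ o.1 →
    pvWalk ss [] c o = ((ss.map (fun s => (s, (1 : Int)))).foldl pvStep (c, o)).2 := by
  intro ss
  induction ss with
  | nil => intro c o hc; simp [pvWalk]
  | cons s ss ih =>
    intro c o hc
    rw [pvWalk]
    simp only [List.map_cons, List.foldl_cons, pvStep]
    by_cases hu : o.1 < c + 1
    · simp only [hu, if_true]; exact ih (c + 1) (c + 1, some s) (by omega)
    · simp only [hu, if_false]; exact ih (c + 1) o (by omega)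

-- B's walk is A's loop body folded over the merged event list (invariant: counter ≤ opti.1)
theorem pvWalk_eq_foldl : ∀ (ss es : List Int) (c : Int) (o : Int × Option Int), c ≤ o.1 →
    pvWalk ss es c o = ((pvMerge ss es).foldl pvStep (c, o)).2 := by
  intro ss es
  fun_induction pvMerge ss es with
  | case1 s ss e es h ih =>
    intro c o hc
    have hno : ¬ o.1 < c + (-1) := by omega
    rw [pvWalk]
    simp only [h, if_true, List.foldl_cons, pvStep, hno, if_false]
    exact ih (c - 1) o (by omega)
  | case2 s ss e es h ih =>
    intro c o hc
    rw [pvWalk]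
    simp only [h, if_false, List.foldl_cons, pvStep]
    by_cases hu : o.1 < c + 1
    · simp only [hu, if_true]; exact ih (c + 1) (c + 1, some s) (by omega)
    · simp only [hu, if_false]; exact ih (c + 1) o (by omega)
  | case3 es =>
    intro c o hc
    rw [pvWalk]
    exact (pvFold_ends es c o hc).symm
  | case4 ss h =>
    intro c o hc
    exact pvWalk_starts ss c o hc

theorem pv_main (set : List (Int × Int)) : intersect_max set = intersect_max_alt set := by
  unfold intersect_max intersect_max_alt
  dsimp only
  have hstarts := PySem.List.sorted_pairwise (set.map Prod.fst) (fun x => x)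
  have hends := PySem.List.sorted_pairwise (set.map (fun p : Int × Int => p.2 + 1)) (fun x => x)
  have hperm : (pvMerge (PySem.List.sorted (set.map Prod.fst) (fun x => x))
      (PySem.List.sorted (set.map (fun p : Int × Int => p.2 + 1)) (fun x => x))).Perm
      (set.map (fun p => (p.1, (1 : Int))) ++ set.map (fun p => (p.2 + 1, (-1 : Int)))) := by
    refine (pvMerge_perm _ _).trans (List.Perm.append ?_ ?_)
    · refine ((PySem.List.sorted_perm _ _ _).map _).trans ?_
      rw [List.map_map]; rfl
    · refine ((PySem.List.sorted_perm _ _ _).map _).trans ?_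
      rw [List.map_map]; rfl
  rw [pvSorted2_eq _ _ hperm (pvMerge_pairwise _ _ hstarts hends)]
  rw [pvWalk_eq_foldl _ _ 0 (0, none) (by omega)]
  rfl

-- ===== VERDICT (by name: the statement is the Claim_ definition above) =====
theorem intersect_max_spec : Claim_equal_intersect_max := by
  intro set _
  unfold Spec_intersect_max
  exact pv_main set
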